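-- pv_equiv track=rewrite | github.com/g24fitzgerald/PortlandState-Python | coursera/session_two/w1/is_one_to_one.py | is_one_to_one
-- ===== SOURCE A (Python) =====
-- def is_one_to_one(d):
--     ''' (dict) -> bool
--
--     Return True if and only if no two d's keys map to the same value
--
--     >>> is_one_to_one({'a': 1, 'b': 2, 'c':3})
--     True
--     >>> is_one_to_one({'a': 1, 'b': 2, 'c':1})
--     False
--     >>> is_one_to_one({})
--     True
--     '''
--     values_seen = []
--     for key in d:
--         #if we've already seen the value in another key, false
--         if d[key] in values_seen:
--             return False
--         else:
--             values_seen.append(d[key])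
--     return True
-- ===== SOURCE B (Python) =====
-- def is_one_to_one(d):
--     return len(set(d.values())) == len(d)
-- ===== Notes on version B (the rewrite author's own statement) =====
-- stated objective: idiomatic
-- what changed: Replaces A's key loop with an early-exit list-membership 'seen' accumulator by one aggregate comparison: build the set of all values and compare its size with the number of keys.
import Mathlib
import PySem

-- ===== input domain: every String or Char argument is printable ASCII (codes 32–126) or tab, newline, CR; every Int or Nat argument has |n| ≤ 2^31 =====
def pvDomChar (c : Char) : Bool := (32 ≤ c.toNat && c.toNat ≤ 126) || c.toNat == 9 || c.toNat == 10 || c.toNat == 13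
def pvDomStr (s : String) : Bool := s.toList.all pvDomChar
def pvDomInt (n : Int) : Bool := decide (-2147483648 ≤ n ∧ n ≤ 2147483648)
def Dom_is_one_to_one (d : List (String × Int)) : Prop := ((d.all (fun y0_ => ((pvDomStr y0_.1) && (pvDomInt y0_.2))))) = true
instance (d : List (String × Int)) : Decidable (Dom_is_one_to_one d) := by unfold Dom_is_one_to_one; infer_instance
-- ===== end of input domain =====

-- B replaces A's early-exit scan with a running 'seen' list by a single aggregate
-- comparison: len(set(values)) == len(d) (idiomatic).

-- ===== PORT A =====
-- A's loop: 'for key in d: if d[key] in values_seen: return False else values_seen.append(d[key])'.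
-- We iterate the dict's keys (the pairs' first components) and look each key up, as A does.
def isLoopA (full : List (String × Int)) (l : List (String × Int)) (seen : List Int) : Bool :=
  match l with
  | [] => true
  | (k, _) :: rest =>
    let v := (PySem.Dict.mk full).getD k 0
    if seen.contains v then false
    else isLoopA full rest (seen ++ [v])

def is_one_to_one (d : List (String × Int)) : Bool := isLoopA d d []

-- ===== PORT B =====
def is_one_to_one_alt (d : List (String × Int)) : Bool :=
  (PySem.Set.ofList (d.map Prod.snd)).length == d.length

-- ===== PRECONDITION & SPEC =====
-- The association list stands for a Python dict, whose keys are necessarily distinct;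
-- a list with duplicate keys represents no dict input, so Pre_ excludes nothing a caller of A could pass.
def Pre_is_one_to_one (d : List (String × Int)) : Prop := (d.map Prod.fst).Nodup
instance (d : List (String × Int)) : Decidable (Pre_is_one_to_one d) := by unfold Pre_is_one_to_one; infer_instance
def pvWitness_is_one_to_one : (List (String × Int)) := [("a", 1), ("b", 2)]
def Spec_is_one_to_one (d : List (String × Int)) (out : Bool) : Prop := out = is_one_to_one_alt d
instance (d : List (String × Int)) (out : Bool) : Decidable (Spec_is_one_to_one d out) := by unfold Spec_is_one_to_one; infer_instance

-- ===== CLAIM (what is proved, stated in full; the proofs are below) =====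
def Claim_equal_is_one_to_one : Prop := ∀ (d : List (String × Int)), Dom_is_one_to_one d → Pre_is_one_to_one d → Spec_is_one_to_one d (is_one_to_one d)

-- ===== LEMMAS AND PROOFS =====

theorem length_foldl_add_le (l : List Int) : ∀ (s : List Int),
    (l.foldl PySem.Set.add s).length ≤ s.length + l.length := by
  induction l with
  | nil => intro s; simp
  | cons x l ih =>
    intro s
    simp only [List.foldl_cons]
    calc (l.foldl PySem.Set.add (PySem.Set.add s x)).length
        ≤ (PySem.Set.add s x).length + l.length := ih _
      _ ≤ s.length + (x :: l).length := by
          rw [PySem.Set.add_eq_ite]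
          split <;> simp <;> omega

theorem length_foldl_add_iff (l : List Int) : ∀ (s : List Int),
    (l.foldl PySem.Set.add s).length = s.length + l.length ↔
      (l.Nodup ∧ ∀ v ∈ l, v ∉ s) := by
  induction l with
  | nil => intro s; simp
  | cons x l ih =>
    intro s
    simp only [List.foldl_cons]
    by_cases hx : x ∈ s
    · rw [PySem.Set.add_of_mem hx]
      constructor
      · intro h
        have := length_foldl_add_le l s
        simp at h; omega
      · rintro ⟨-, h⟩
        exact absurd hx (h x (by simp))
    · rw [PySem.Set.add_of_not_mem hx]
      rw [show s.length + (x :: l).length = (s ++ [x]).length + l.length by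
        simp; omega]
      rw [ih (s ++ [x])]
      constructor
      · rintro ⟨hnd, h⟩
        refine ⟨List.nodup_cons.mpr ⟨fun hm => (h x hm) (by simp), hnd⟩, ?_⟩
        intro v hv
        rcases List.mem_cons.mp hv with rfl | hv
        · exact hx
        · intro hvs; exact (h v hv) (by simp [hvs])
      · rintro ⟨hnd, h⟩
        rcases List.nodup_cons.mp hnd with ⟨hxl, hnd⟩
        refine ⟨hnd, ?_⟩
        intro v hv hvm
        rcases List.mem_append.mp hvm with hvs | hvx
        · exact h v (by simp [hv]) hvs
        · simp at hvx; subst hvx; exact hxl hv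

theorem alt_eq_true_iff (d : List (String × Int)) :
    is_one_to_one_alt d = true ↔ (d.map Prod.snd).Nodup := by
  unfold is_one_to_one_alt
  rw [PySem.Set.ofList_eq_foldl]
  rw [beq_iff_eq]
  have h := length_foldl_add_iff (d.map Prod.snd) []
  simp only [List.length_nil, Nat.zero_add, List.not_mem_nil, not_false_iff,
    implies_true, and_true] at h
  simpa using h

theorem loopA_eq_true_iff (l : List (String × Int)) (full : List (String × Int)) :
    ∀ (seen : List Int), (∀ p ∈ l, (PySem.Dict.mk full).getD p.1 0 = p.2) →
      (isLoopA full l seen = true ↔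
        ((l.map Prod.snd).Nodup ∧ ∀ v ∈ l.map Prod.snd, v ∉ seen)) := by
  induction l with
  | nil => intro seen _; simp [isLoopA]
  | cons p l ih =>
    intro seen hlk
    obtain ⟨k, v⟩ := p
    have hv : (PySem.Dict.mk full).getD k 0 = v := hlk (k, v) (by simp)
    simp only [isLoopA, hv]
    by_cases hm : v ∈ seen
    · simp only [List.contains_iff_mem.mpr hm, if_true]
      constructor
      · intro h; exact absurd h (by simp)
      · rintro ⟨-, h⟩
        exact absurd hm (h v (by simp))
    · rw [if_neg (by simpa using hm)]
      rw [ih (seen ++ [v]) (fun q hq => hlk q (by simp [hq]))]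
      constructor
      · rintro ⟨hnd, h⟩
        simp only [List.map_cons]
        refine ⟨List.nodup_cons.mpr ⟨fun hvm => (h v hvm) (by simp), hnd⟩, ?_⟩
        intro w hw
        rcases List.mem_cons.mp hw with rfl | hw
        · exact hm
        · intro hws; exact (h w hw) (by simp [hws])
      · rintro ⟨hnd, h⟩
        simp only [List.map_cons] at hnd h
        rcases List.nodup_cons.mp hnd with ⟨hvl, hnd'⟩
        refine ⟨hnd', ?_⟩
        intro w hw hwm
        rcases List.mem_append.mp hwm with hws | hwv
        · exact h w (by simp [hw]) hws
        · simp at hwv; subst hwv; exact hvl hw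

-- ===== VERDICT (by name: the statement is the Claim_ definition above) =====
theorem is_one_to_one_spec : Claim_equal_is_one_to_one := by
  intro d _ hpre
  unfold Spec_is_one_to_one is_one_to_one
  have hlk : ∀ p ∈ d, (PySem.Dict.mk d).getD p.1 0 = p.2 := by
    intro p hp
    exact PySem.Dict.getD_of_mem_items (d := PySem.Dict.mk d) (by simpa using hp) (by simpa using hpre) 0
  rw [Bool.eq_iff_iff, loopA_eq_true_iff d d [] hlk, alt_eq_true_iff]
  simp
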